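-- pv_equiv track=rewrite | github.com/catowabisabi/meow-code | api_server/services/sandbox/path_validation.py | extract_paths_sed
-- ===== SOURCE A (Python) =====
-- def extract_paths_sed(args: list) -> list:
--     """Extract paths from sed command."""
--     paths = []
--     skip_next = False
--     script_found = False
--     after_double_dash = False
--
--     for i, arg in enumerate(args):
--         if skip_next:
--             skip_next = False
--             continue
--
--         if after_double_dash:
--             paths.append(arg)
--             continue
--
--         if arg == "--":
--             after_double_dash = True
--             continue
--
--         if not after_double_dash and arg.startswith("-"):
--             if arg in {"-f", "--file"}:
--                 if i + 1 < len(args):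
--                     paths.append(args[i + 1])
--                 skip_next = True
--             script_found = True
--             continue
--
--         if not script_found:
--             script_found = True
--             continue
--
--         paths.append(arg)
--
--     return paths
-- ===== SOURCE B (Python) =====
-- def extract_paths_sed(args: list) -> list:
--     """Extract paths from sed command: two stages - tokenize, then interpret."""
--     paths = []
--     first = True
--     for kind, val in _sed_tokens(args):
--         if kind == "rest":
--             paths.extend(val)
--         elif kind == "file":
--             if val is not None:
--                 paths.append(val)
--             first = False
--         elif kind == "opt":
--             first = False
--         else:  # "plain"
--             if first:
--                 first = False
--             else:
--                 paths.append(val)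
--     return paths
--
--
-- def _sed_tokens(args):
--     """Lex the argument vector into (kind, value) tokens."""
--     tokens = []
--     i, n = 0, len(args)
--     while i < n:
--         a = args[i]
--         if a == "--":
--             tokens.append(("rest", args[i + 1:]))
--             break
--         if a.startswith("-"):
--             if a in ("-f", "--file"):
--                 tokens.append(("file", args[i + 1] if i + 1 < n else None))
--                 i += 2
--             else:
--                 tokens.append(("opt", None))
--                 i += 1
--         else:
--             tokens.append(("plain", a))
--             i += 1
--     return tokens
-- ===== Notes on version B (the rewrite author's own statement) =====
-- stated objective: alternative
-- what changed: A's one-pass state machine with three flags is replaced by a two-stage lexer/interpreter: a first pass lexes the argv into a token list (opt / file-with-value / plain / rest-after-'--'), and a second pass folds the tokens into paths, dropping only a leading plain token (the script).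
import Mathlib
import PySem

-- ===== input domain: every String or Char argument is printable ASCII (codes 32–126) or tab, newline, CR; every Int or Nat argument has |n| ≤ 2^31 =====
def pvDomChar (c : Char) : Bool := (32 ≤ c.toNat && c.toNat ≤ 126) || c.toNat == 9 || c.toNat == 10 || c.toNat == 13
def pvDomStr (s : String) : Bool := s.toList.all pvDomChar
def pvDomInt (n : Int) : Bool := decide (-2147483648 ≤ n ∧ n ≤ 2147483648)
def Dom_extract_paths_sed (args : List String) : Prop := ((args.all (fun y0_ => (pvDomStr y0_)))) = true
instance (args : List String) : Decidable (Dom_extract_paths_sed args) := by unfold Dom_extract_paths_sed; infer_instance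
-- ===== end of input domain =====

-- B replaces A's one-pass three-flag state machine by a two-stage lexer/interpreter
-- (tokenize the argv, then fold the tokens); objective: alternative (same O(n) cost).

-- ===== PORT A =====
-- one step of A's for loop: state = (paths, skip_next, script_found, after_double_dash)
def sedStepA (args : List String) (st : List String × Bool × Bool × Bool)
    (p : Int × String) : List String × Bool × Bool × Bool :=
  match st with
  | (paths, skip_next, script_found, after_double_dash) =>
    if skip_next then (paths, false, script_found, after_double_dash)
    else if after_double_dash then (paths ++ [p.2], skip_next, script_found, after_double_dash)
    else if p.2 == "--" then (paths, skip_next, script_found, true)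
    else if !after_double_dash && PySem.Str.startswith p.2 "-" then
      if p.2 == "-f" || p.2 == "--file" then
        ((if p.1 + 1 < (args.length : Int)
            then paths ++ (PySem.List.pyGet? args (p.1 + 1)).toList
            else paths), true, true, after_double_dash)
      else (paths, skip_next, true, after_double_dash)
    else if !script_found then (paths, skip_next, true, after_double_dash)
    else (paths ++ [p.2], skip_next, script_found, after_double_dash)

def extract_paths_sed (args : List String) : List String :=
  (List.foldl (sedStepA args) ([], false, false, false) (PySem.List.enumerate args 0)).1

-- ===== PORT B =====
-- Source B's token type: ("opt",None) / ("file",v) / ("plain",a) / ("rest",tail)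
inductive SedTok where
  | opt : SedTok
  | file : Option String → SedTok
  | plain : String → SedTok
  | rest : List String → SedTok
deriving DecidableEq, Repr

-- Source B's _sed_tokens: lex the argv into tokens (while loop over index i)
def sedTokens (args : List String) (i : Nat) : List SedTok :=
  if h : i < args.length then
    let a := args[i]
    if a == "--" then [SedTok.rest (PySem.List.slice args (some ((i : Int) + 1)) none)]
    else if PySem.Str.startswith a "-" then
      if a == "-f" || a == "--file" then
        SedTok.file (if h2 : i + 1 < args.length then some args[i + 1] else none)
          :: sedTokens args (i + 2)
      else SedTok.opt :: sedTokens args (i + 1)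
    else SedTok.plain a :: sedTokens args (i + 1)
  else []
termination_by args.length - i

-- Source B's interpreting for loop: state = (paths, first)
def sedStepB (st : List String × Bool) (t : SedTok) : List String × Bool :=
  match t with
  | SedTok.rest tail => (st.1 ++ tail, st.2)
  | SedTok.file v =>
      ((match v with | some s => st.1 ++ [s] | none => st.1), false)
  | SedTok.opt => (st.1, false)
  | SedTok.plain a => if st.2 then (st.1, false) else (st.1 ++ [a], st.2)

def extract_paths_sed_alt (args : List String) : List String :=
  (List.foldl sedStepB ([], true) (sedTokens args 0)).1

-- ===== PRECONDITION & SPEC =====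
def Spec_extract_paths_sed (args : List String) (out : List String) : Prop := out = extract_paths_sed_alt args
instance (args : List String) (out : List String) : Decidable (Spec_extract_paths_sed args out) := by unfold Spec_extract_paths_sed; infer_instance

-- ===== CLAIM (what is proved, stated in full; the proofs are below) =====
def Claim_equal_extract_paths_sed : Prop := ∀ (args : List String), Dom_extract_paths_sed args → Spec_extract_paths_sed args (extract_paths_sed args)

-- ===== LEMMAS AND PROOFS =====

-- once after_double_dash is set (and skip_next is clear), A appends every remaining arg
lemma sed_addMode (args : List String) :
    ∀ (l : List String) (s : Int) (paths : List String) (sf : Bool),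
      List.foldl (sedStepA args) (paths, false, sf, true) (PySem.List.enumerate l s)
        = (paths ++ l, false, sf, true) := by
  intro l
  induction l with
  | nil => intro s paths sf; simp [PySem.List.enumerate_nil]
  | cons a t ih =>
      intro s paths sf
      rw [PySem.List.enumerate_cons, List.foldl_cons]
      have hstep : sedStepA args (paths, false, sf, true) (s, a)
          = (paths ++ [a], false, sf, true) := by simp [sedStepA]
      rw [hstep, ih]
      simp

lemma drop_facts {args t : List String} {a : String} {i : Nat}
    (h : args.drop i = a :: t) :
    i < args.length ∧ args[i]? = some a ∧ args.drop (i + 1) = t := by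
  have hlen : args.length - i = t.length + 1 := by
    have := congrArg List.length h; simpa using this
  have hi : i < args.length := by omega
  refine ⟨hi, ?_, ?_⟩
  · have h0 : args[i + 0]? = some a := by
      rw [← List.getElem?_drop, h]; rfl
    simpa using h0
  · have h2 : (args.drop i).drop 1 = args.drop (i + 1) := by
      rw [List.drop_drop]
    rw [h] at h2
    simpa using h2.symm

-- main invariant: A's fold over the enumerated suffix starting at i equals B's
-- interpreter run over the tokens lexed from position i (sf in A ↔ ¬first in B)
lemma sed_main (args : List String) :
    ∀ (n : Nat) (l : List String), l.length ≤ n → ∀ (i : Nat), args.drop i = l →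
      ∀ (paths : List String) (sf : Bool),
        (List.foldl (sedStepA args) (paths, false, sf, false)
            (PySem.List.enumerate l (i : Int))).1
          = (List.foldl sedStepB (paths, !sf) (sedTokens args i)).1 := by
  intro n
  induction n with
  | zero =>
      intro l hlen i hdrop paths sf
      have hl : l = [] := List.eq_nil_of_length_eq_zero (by omega)
      subst hl
      have hi : ¬ i < args.length := by
        have := congrArg List.length hdrop; simp at this; omega
      rw [sedTokens]
      simp [PySem.List.enumerate_nil, hi]
  | succ n ihn =>
      intro l hlen i hdrop paths sf
      match l, hlen with
      | [], _ =>
        have hi : ¬ i < args.length := by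
          have := congrArg List.length hdrop; simp at this; omega
        rw [sedTokens]
        simp [PySem.List.enumerate_nil, hi]
      | a :: t, hlen =>
        obtain ⟨hi, hget, hdrop1⟩ := drop_facts hdrop
        have ha : args[i] = a := by
          have := List.getElem?_eq_getElem hi
          rw [hget] at this; exact (Option.some.inj this).symm
        rw [sedTokens, dif_pos hi]
        rw [PySem.List.enumerate_cons, List.foldl_cons]
        by_cases hdd : a = "--"
        · -- '--' branch: A enters append-everything mode; B lexes a single rest token
          have hstep : sedStepA args (paths, false, sf, false) ((i : Int), a)
              = (paths, false, sf, true) := by simp [sedStepA, hdd]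
          rw [hstep, sed_addMode]
          have hsl : PySem.List.slice args (some ((i : Int) + 1)) none = args.drop (i + 1) := by
            have := PySem.List.slice_from_natCast args (i + 1)
            push_cast at this ⊢
            exact this
          simp [ha, hdd, hsl, hdrop1, sedStepB]
        · by_cases hopt : PySem.Chars.startswith a.toList ['-'] = true
          · by_cases hf : a = "-f" ∨ a = "--file"
            · -- '-f' / '--file' branch: B lexes a file token carrying the next arg
              have hstep :
                  sedStepA args (paths, false, sf, false) ((i : Int), a)
                    = ((if (i : Int) + 1 < (args.length : Int)
                          then paths ++ (PySem.List.pyGet? args ((i : Int) + 1)).toList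
                          else paths), true, true, false) := by
                simp [sedStepA, hdd, hopt, hf]
              rw [hstep]
              cases t with
              | nil =>
                  have hlen1 : args.length = i + 1 := by
                    have := congrArg List.length hdrop1; simp at this; omega
                  have hnlt : ¬ ((i : Int) + 1 < (args.length : Int)) := by
                    rw [hlen1]; push_cast; omega
                  rw [if_neg hnlt, sedTokens]
                  have hstop : ¬ i + 2 < args.length := by omega
                  have hn1 : ¬ i + 1 < args.length := by omega
                  simp [PySem.List.enumerate_nil, ha, hdd, hopt, hf, hstop, hn1, sedStepB]
              | cons b t' =>
                  obtain ⟨hi1, hget1, hdrop2⟩ := drop_facts hdrop1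
                  have hb : args[i + 1] = b := by
                    have := List.getElem?_eq_getElem hi1
                    rw [hget1] at this; exact (Option.some.inj this).symm
                  have hlt : (i : Int) + 1 < (args.length : Int) := by
                    have : ((i + 1 : Nat) : Int) < ((args.length : Nat) : Int) := by
                      exact_mod_cast hi1
                    push_cast at this; omega
                  rw [if_pos hlt]
                  have hgetI : PySem.List.pyGet? args ((i : Int) + 1) = some b := by
                    have hc : ((i : Int) + 1) = ((i + 1 : Nat) : Int) := by push_cast; ring
                    rw [hc, PySem.List.pyGet?_natCast, hget1]
                  rw [hgetI]
                  rw [PySem.List.enumerate_cons, List.foldl_cons]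
                  have hskip :
                      sedStepA args (paths ++ [b], true, true, false) ((i : Int) + 1, b)
                        = (paths ++ [b], false, true, false) := by
                    simp [sedStepA]
                  simp only [Option.toList]
                  rw [hskip]
                  have hc2 : ((i : Int) + 1 + 1) = (((i + 2 : Nat)) : Int) := by push_cast; ring
                  have e2 : i + 1 + 1 = i + 2 := by omega
                  rw [e2] at hdrop2
                  rw [hc2, ihn t' (by simp at hlen; omega) (i + 2) hdrop2]
                  simp [ha, hdd, hopt, hf, hi1, hb, sedStepB]
            · -- other option branch: B lexes an opt token
              have hstep : sedStepA args (paths, false, sf, false) ((i : Int), a)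
                  = (paths, false, true, false) := by
                simp [sedStepA, hdd, hopt, hf]
              rw [hstep]
              have hc : ((i : Int) + 1) = (((i + 1 : Nat)) : Int) := by push_cast; ring
              rw [hc, ihn t (by simp at hlen; omega) (i + 1) hdrop1]
              simp [ha, hdd, hopt, hf, sedStepB]
          · -- plain branch: B lexes a plain token; first = !sf decides skip vs append
            by_cases hsf : sf = true
            · have hstep : sedStepA args (paths, false, sf, false) ((i : Int), a)
                  = (paths ++ [a], false, sf, false) := by
                simp [sedStepA, hdd, hopt, hsf]
              rw [hstep]
              have hc : ((i : Int) + 1) = (((i + 1 : Nat)) : Int) := by push_cast; ring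
              rw [hc, ihn t (by simp at hlen; omega) (i + 1) hdrop1]
              simp [ha, hdd, hopt, hsf, sedStepB]
            · have hstep : sedStepA args (paths, false, sf, false) ((i : Int), a)
                  = (paths, false, true, false) := by
                simp [sedStepA, hdd, hopt, hsf]
              rw [hstep]
              have hc : ((i : Int) + 1) = (((i + 1 : Nat)) : Int) := by push_cast; ring
              rw [hc, ihn t (by simp at hlen; omega) (i + 1) hdrop1]
              simp [ha, hdd, hopt, hsf, sedStepB]

-- ===== VERDICT (by name: the statement is the Claim_ definition above) =====
theorem extract_paths_sed_spec : Claim_equal_extract_paths_sed := by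
  intro args _
  unfold Spec_extract_paths_sed extract_paths_sed extract_paths_sed_alt
  simpa using sed_main args args.length args (le_refl _) 0 (by simp) [] false
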